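-- pv_equiv track=rewrite | github.com/bckatarzyna/machine_translation | phrase_extraction/phrase_extraction.py | aligned
-- ===== SOURCE A (Python) =====
-- def aligned(A, f_ind, e_start, e_end):
--     f_aligned = []
--     for pair in A:
--         e, f = int(pair[0]), int(pair[1])
--         if f == f_ind:
--             f_aligned.append(e)
--     if len(f_aligned) > 0 and (min(f_aligned) < e_start or max(f_aligned) > e_end):
--         return False
--     return True
-- ===== SOURCE B (Python) =====
-- def aligned(A, f_ind, e_start, e_end):
--     for pair in A:
--         e, f = int(pair[0]), int(pair[1])
--         if f == f_ind and (e < e_start or e > e_end):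
--             return False
--     return True
-- ===== Notes on version B (the rewrite author's own statement) =====
-- stated objective: simpler
-- what changed: Drops the collected f_aligned list and the min/max aggregation passes; a single early-exit scan returns False as soon as one matching alignment point falls outside [e_start, e_end].
import Mathlib
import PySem

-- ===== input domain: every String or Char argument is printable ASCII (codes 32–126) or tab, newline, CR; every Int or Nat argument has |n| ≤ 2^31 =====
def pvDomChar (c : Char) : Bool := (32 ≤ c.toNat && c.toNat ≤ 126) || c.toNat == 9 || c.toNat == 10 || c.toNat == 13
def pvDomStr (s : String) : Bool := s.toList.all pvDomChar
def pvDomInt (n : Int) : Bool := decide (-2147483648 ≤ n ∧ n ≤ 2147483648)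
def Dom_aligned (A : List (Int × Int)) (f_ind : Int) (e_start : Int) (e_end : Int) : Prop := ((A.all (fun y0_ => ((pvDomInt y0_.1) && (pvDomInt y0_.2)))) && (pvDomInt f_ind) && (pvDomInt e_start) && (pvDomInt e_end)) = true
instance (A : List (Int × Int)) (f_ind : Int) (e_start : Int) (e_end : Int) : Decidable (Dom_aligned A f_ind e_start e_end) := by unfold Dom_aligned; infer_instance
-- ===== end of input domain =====

-- ===== PORT A =====
-- A: collect the e-indices aligned to f_ind into a list, then test min/max against the range.
def aligned (A : List (Int × Int)) (f_ind : Int) (e_start : Int) (e_end : Int) : Bool :=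
  let f_aligned := A.foldl (fun acc pair => if pair.2 = f_ind then acc ++ [pair.1] else acc) []
  match PySem.List.min? f_aligned (fun x => x), PySem.List.max? f_aligned (fun x => x) with
  | some m, some M => if m < e_start ∨ M > e_end then false else true
  | _, _ => true

-- ===== PORT B =====
-- B: single early-exit scan; no collected list, no aggregation.
def aligned_alt (A : List (Int × Int)) (f_ind : Int) (e_start : Int) (e_end : Int) : Bool :=
  match A with
  | [] => true
  | pair :: rest =>
    if pair.2 = f_ind ∧ (pair.1 < e_start ∨ pair.1 > e_end) then false
    else aligned_alt rest f_ind e_start e_end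

-- ===== PRECONDITION & SPEC =====
def Spec_aligned (A : List (Int × Int)) (f_ind : Int) (e_start : Int) (e_end : Int) (out : Bool) : Prop := out = aligned_alt A f_ind e_start e_end
instance (A : List (Int × Int)) (f_ind : Int) (e_start : Int) (e_end : Int) (out : Bool) : Decidable (Spec_aligned A f_ind e_start e_end out) := by unfold Spec_aligned; infer_instance

-- ===== CLAIM (what is proved, stated in full; the proofs are below) =====
def Claim_equal_aligned : Prop := ∀ (A : List (Int × Int)) (f_ind : Int) (e_start : Int) (e_end : Int), Dom_aligned A f_ind e_start e_end → Spec_aligned A f_ind e_start e_end (aligned A f_ind e_start e_end)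

-- ===== LEMMAS AND PROOFS =====
theorem pv_foldl_collect (A : List (Int × Int)) (f_ind : Int) (acc : List Int) :
    A.foldl (fun acc pair => if pair.2 = f_ind then acc ++ [pair.1] else acc) acc
      = acc ++ A.filterMap (fun pair => if pair.2 = f_ind then some pair.1 else none) := by
  induction A generalizing acc with
  | nil => simp
  | cons p t ih =>
    simp only [List.foldl_cons, List.filterMap_cons]
    by_cases h : p.2 = f_ind <;> simp [h, ih]

theorem pv_foldl_min_lt (t : List Int) (a s : Int) :
    t.foldl min a < s ↔ a < s ∨ ∃ x ∈ t, x < s := by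
  induction t generalizing a with
  | nil => simp
  | cons b t ih =>
    simp only [List.foldl_cons, ih, min_lt_iff, List.mem_cons]
    constructor
    · rintro (⟨h | h⟩ | ⟨x, hx, h⟩)
      · exact Or.inl h
      · exact Or.inr ⟨b, Or.inl rfl, h⟩
      · exact Or.inr ⟨x, Or.inr hx, h⟩
    · rintro (h | ⟨x, (rfl | hx), h⟩)
      · exact Or.inl (Or.inl h)
      · exact Or.inl (Or.inr h)
      · exact Or.inr ⟨x, hx, h⟩

theorem pv_foldl_lt_max (t : List Int) (a s : Int) :
    s < t.foldl max a ↔ s < a ∨ ∃ x ∈ t, s < x := by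
  induction t generalizing a with
  | nil => simp
  | cons b t ih =>
    simp only [List.foldl_cons, ih, lt_max_iff, List.mem_cons]
    constructor
    · rintro (⟨h | h⟩ | ⟨x, hx, h⟩)
      · exact Or.inl h
      · exact Or.inr ⟨b, Or.inl rfl, h⟩
      · exact Or.inr ⟨x, Or.inr hx, h⟩
    · rintro (h | ⟨x, (rfl | hx), h⟩)
      · exact Or.inl (Or.inl h)
      · exact Or.inl (Or.inr h)
      · exact Or.inr ⟨x, hx, h⟩

theorem pv_aligned_iff (A : List (Int × Int)) (f_ind e_start e_end : Int) :
    aligned A f_ind e_start e_end = true ↔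
      ∀ p ∈ A, p.2 = f_ind → e_start ≤ p.1 ∧ p.1 ≤ e_end := by
  unfold aligned
  rw [pv_foldl_collect]
  simp only [List.nil_append]
  have hmem : ∀ (x : Int),
      (x ∈ A.filterMap (fun pair => if pair.2 = f_ind then some pair.1 else none)) ↔
      ∃ p ∈ A, p.2 = f_ind ∧ p.1 = x := by
    intro x
    simp only [List.mem_filterMap]
    constructor
    · rintro ⟨p, hp, h⟩
      by_cases hf : p.2 = f_ind
      · simp [hf] at h; exact ⟨p, hp, hf, h⟩
      · simp [hf] at h
    · rintro ⟨p, hp, hf, hx⟩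
      exact ⟨p, hp, by simp [hf, hx]⟩
  cases hl : A.filterMap (fun pair => if pair.2 = f_ind then some pair.1 else none) with
  | nil =>
    simp only [PySem.List.min?, PySem.List.max?]
    simp only [List.foldl_nil]
    constructor
    · intro _ p hp hf
      exfalso
      have := (hmem p.1).mpr ⟨p, hp, hf, rfl⟩
      rw [hl] at this; simp at this
    · intro _; trivial
  | cons a t =>
    rw [PySem.List.min?_id_cons, PySem.List.max?_id_cons]
    simp only
    constructor
    · intro h p hp hf
      by_contra hc
      push Not at hc
      have hx : p.1 ∈ a :: t := by
        rw [← hl]; exact (hmem p.1).mpr ⟨p, hp, hf, rfl⟩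
      have hbad : t.foldl min a < e_start ∨ e_end < t.foldl max a := by
        rcases List.mem_cons.mp hx with h1 | h1
        · by_cases hlt : p.1 < e_start
          · left; rw [pv_foldl_min_lt]; exact Or.inl (h1 ▸ hlt)
          · right; rw [pv_foldl_lt_max]; exact Or.inl (h1 ▸ hc (le_of_not_gt hlt))
        · by_cases hlt : p.1 < e_start
          · left; rw [pv_foldl_min_lt]; exact Or.inr ⟨p.1, h1, hlt⟩
          · right; rw [pv_foldl_lt_max]; exact Or.inr ⟨p.1, h1, hc (le_of_not_gt hlt)⟩
      simp [hbad] at h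
    · intro h
      have hall : ∀ x ∈ a :: t, e_start ≤ x ∧ x ≤ e_end := by
        intro x hx
        rw [← hl] at hx
        obtain ⟨p, hp, hf, hpx⟩ := (hmem x).mp hx
        exact hpx ▸ h p hp hf
      have h1 : ¬ t.foldl min a < e_start := by
        rw [pv_foldl_min_lt]
        push Not
        exact ⟨(hall a (List.mem_cons_self)).1, fun x hx => (hall x (List.mem_cons_of_mem a hx)).1⟩
      have h2 : ¬ e_end < t.foldl max a := by
        rw [pv_foldl_lt_max]
        push Not
        exact ⟨(hall a (List.mem_cons_self)).2, fun x hx => (hall x (List.mem_cons_of_mem a hx)).2⟩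
      simp [h1, h2]

theorem pv_alt_iff (A : List (Int × Int)) (f_ind e_start e_end : Int) :
    aligned_alt A f_ind e_start e_end = true ↔
      ∀ p ∈ A, p.2 = f_ind → e_start ≤ p.1 ∧ p.1 ≤ e_end := by
  induction A with
  | nil => simp [aligned_alt]
  | cons p t ih =>
    unfold aligned_alt
    by_cases h : p.2 = f_ind ∧ (p.1 < e_start ∨ p.1 > e_end)
    · simp only [if_pos h]
      constructor
      · intro hc; exact absurd hc (by simp)
      · intro hall
        obtain ⟨hf, hout⟩ := h
        have := hall p (List.mem_cons_self) hf
        omega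
    · simp only [if_neg h, ih]
      constructor
      · intro hall q hq hf
        rcases List.mem_cons.mp hq with rfl | hq
        · push Not at h
          have := h hf
          omega
        · exact hall q hq hf
      · intro hall q hq hf
        exact hall q (List.mem_cons_of_mem p hq) hf

-- ===== VERDICT (by name: the statement is the Claim_ definition above) =====
theorem aligned_spec : Claim_equal_aligned := by
  intro A f_ind e_start e_end _
  unfold Spec_aligned
  rw [Bool.eq_iff_iff, pv_aligned_iff, pv_alt_iff]
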